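-- pv_equiv track=rewrite | github.com/Assystant/SpotAxis | resume_parser/conflict_management_system.py | calculate_status
-- ===== SOURCE A (Python) =====
-- def calculate_status(conflicts_list):
--     if conflicts_list:
--         for conflict in conflicts_list:
--             if conflict['status'] == 0:
--                 return 0
--         for conflict in conflicts_list:
--             if conflict['status'] == 1:
--                 return 1
--         for conflict in conflicts_list:
--             if conflict['status'] == 2:
--                 return 2
--         return 3
--     else:
--         return 3
-- ===== SOURCE B (Python) =====
-- def calculate_status(conflicts_list):
--     if not conflicts_list:
--         return 3
--     best = 3
--     for conflict in conflicts_list: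
--         s = conflict['status']
--         if 0 <= s <= 2 and s < best:
--             if s == 0:
--                 return 0
--             best = s
--     return best
-- ===== Notes on version B (the rewrite author's own statement) =====
-- stated objective: alternative
-- what changed: Replaces A's three staged scans (one per status value 0,1,2) with a single pass that maintains a running minimum of the in-range statuses (early return on 0), returning the accumulator (3 if none seen).
import Mathlib
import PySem

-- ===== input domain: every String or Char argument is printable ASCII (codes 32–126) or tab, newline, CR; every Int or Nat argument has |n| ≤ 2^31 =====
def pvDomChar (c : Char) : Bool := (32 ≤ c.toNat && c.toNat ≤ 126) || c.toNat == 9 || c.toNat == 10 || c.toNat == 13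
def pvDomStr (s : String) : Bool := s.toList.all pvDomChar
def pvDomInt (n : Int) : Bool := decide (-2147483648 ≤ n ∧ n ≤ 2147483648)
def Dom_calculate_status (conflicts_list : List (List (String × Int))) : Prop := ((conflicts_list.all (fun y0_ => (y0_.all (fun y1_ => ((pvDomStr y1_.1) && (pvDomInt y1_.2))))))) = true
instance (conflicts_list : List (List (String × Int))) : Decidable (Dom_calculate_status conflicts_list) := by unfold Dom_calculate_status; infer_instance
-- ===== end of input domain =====

-- B replaces A's three staged scans with one pass keeping a running minimum of the
-- in-range statuses (early return on 0); equivalence of the RETURN values is proved below.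

-- ===== PORT A =====
-- conflict['status'] on an association-list dict: first matching key (none = KeyError)
def getStatus? (c : List (String × Int)) : Option Int :=
  (c.find? (fun p => p.1 == "status")).map (·.2)

-- one 'for conflict in conflicts_list: if conflict['status'] == s: return s' loop of A
def scanStatusA (conflicts : List (List (String × Int))) (s : Int) : Bool :=
  match conflicts with
  | [] => false
  | c :: rest =>
    if getStatus? c == some s then true else scanStatusA rest s

def calculate_status (conflicts_list : List (List (String × Int))) : Int :=
  if !conflicts_list.isEmpty then
    if scanStatusA conflicts_list 0 then 0
    else if scanStatusA conflicts_list 1 then 1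
    else if scanStatusA conflicts_list 2 then 2
    else 3
  else 3

-- ===== PORT B =====
-- B's single loop: s = conflict['status']; if 0 <= s <= 2 and s < best: return 0 on s == 0 else best = s.
-- Inside Pre_ every status consulted exists; a missing one is ported as getD 3 (out of range, skipped).
def loopB (conflicts : List (List (String × Int))) (best : Int) : Int :=
  match conflicts with
  | [] => best
  | c :: rest =>
    let s := (getStatus? c).getD 3
    if 0 ≤ s ∧ s ≤ 2 ∧ s < best then
      if s == 0 then 0 else loopB rest s
    else loopB rest best

def calculate_status_alt (conflicts_list : List (List (String × Int))) : Int :=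
  if conflicts_list.isEmpty then 3 else loopB conflicts_list 3

-- ===== PRECONDITION & SPEC =====
-- Pre_ excludes exactly the inputs on which A raises KeyError: those whose first conflict
-- lacking a "status" key is not preceded by a conflict with status 0 (B raises there too).
def Pre_calculate_status (conflicts_list : List (List (String × Int))) : Prop :=
  (conflicts_list.all (fun c => (getStatus? c).isSome)
    || (conflicts_list.takeWhile (fun c => (getStatus? c).isSome)).any
         (fun c => getStatus? c == some 0)) = true
instance (conflicts_list : List (List (String × Int))) : Decidable (Pre_calculate_status conflicts_list) := by
  unfold Pre_calculate_status; infer_instance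

def pvWitness_calculate_status : (List (List (String × Int))) :=
  [[("status", 2)], [("status", 1), ("other", 0)], [("status", 1)]]

def Spec_calculate_status (conflicts_list : List (List (String × Int))) (out : Int) : Prop := out = calculate_status_alt conflicts_list
instance (conflicts_list : List (List (String × Int))) (out : Int) : Decidable (Spec_calculate_status conflicts_list out) := by unfold Spec_calculate_status; infer_instance

-- ===== CLAIM (what is proved, stated in full; the proofs are below) =====
def Claim_equal_calculate_status : Prop := ∀ (conflicts_list : List (List (String × Int))), Dom_calculate_status conflicts_list → Pre_calculate_status conflicts_list → Spec_calculate_status conflicts_list (calculate_status conflicts_list)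

-- ===== LEMMAS AND PROOFS =====

-- A's nonempty-case result, as a function
def fA (l : List (List (String × Int))) : Int :=
  if scanStatusA l 0 then 0
  else if scanStatusA l 1 then 1
  else if scanStatusA l 2 then 2
  else 3

theorem fA_bounds (l : List (List (String × Int))) : 0 ≤ fA l ∧ fA l ≤ 3 := by
  unfold fA; split_ifs <;> omega

theorem fA_eq_zero_iff (l : List (List (String × Int))) :
    fA l = 0 ↔ scanStatusA l 0 = true := by
  unfold fA; split_ifs <;> simp_all

-- an element with status 0 makes A's first scan succeed
theorem scan0_of_mem (l : List (List (String × Int))) (c : List (String × Int))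
    (hmem : c ∈ l) (hc0 : getStatus? c = some 0) : scanStatusA l 0 = true := by
  induction l with
  | nil => simp at hmem
  | cons d rest ih =>
    show (if getStatus? d == some 0 then true else scanStatusA rest 0) = true
    rcases List.mem_cons.mp hmem with h | h
    · subst h; simp [hc0]
    · by_cases hd : getStatus? d == some 0
      · simp [hd]
      · simp [hd, ih h]

-- if some conflict has status 0, B's loop returns 0 (for a positive accumulator)
theorem loopB_zero (l : List (List (String × Int))) (best : Int)
    (hb : 0 < best) (h : scanStatusA l 0 = true) : loopB l best = 0 := by
  induction l generalizing best with
  | nil => simp [scanStatusA] at h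
  | cons c rest ih =>
    unfold loopB
    by_cases hc : getStatus? c = some 0
    · simp [hc, hb]
    · have h' : scanStatusA rest 0 = true := by
        unfold scanStatusA at h
        simpa [hc] using h
      have hsne : (getStatus? c).getD 3 ≠ 0 := by
        cases hg : getStatus? c with
        | none => simp
        | some v =>
          simp only [Option.getD_some]
          intro hv0; exact hc (by rw [hg, hv0])
      by_cases hcond : 0 ≤ (getStatus? c).getD 3 ∧ (getStatus? c).getD 3 ≤ 2 ∧ (getStatus? c).getD 3 < best
      · have hne : ((getStatus? c).getD 3 == (0 : Int)) = false := by
          simpa using hsne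
        simp only [hcond, hne, Bool.false_eq_true, if_false]
        exact ih _ (by omega) h'
      · rw [if_neg hcond]
        exact ih _ hb h'

-- main invariant: for accumulator in {1,2,3} and all statuses present,
-- B's loop computes min best (fA l)
theorem loopB_min (l : List (List (String × Int))) (best : Int)
    (hb : best = 1 ∨ best = 2 ∨ best = 3)
    (hpre : (l.all (fun c => (getStatus? c).isSome)) = true) :
    loopB l best = min best (fA l) := by
  induction l generalizing best with
  | nil =>
    simp only [loopB, show fA ([] : List (List (String × Int))) = 3 from rfl]
    omega
  | cons c rest ih =>
    simp only [List.all_cons, Bool.and_eq_true] at hpre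
    obtain ⟨hc, hrest⟩ := hpre
    obtain ⟨v, hv⟩ := Option.isSome_iff_exists.mp hc
    have hscan : ∀ k : Int, scanStatusA (c :: rest) k = ((v == k) || scanStatusA rest k) := by
      intro k
      show (if getStatus? c == some k then true else scanStatusA rest k) = _
      by_cases hvk : v = k <;> simp [hv, hvk]
    have hrb := fA_bounds rest
    have h0 := fA_eq_zero_iff rest
    show (if 0 ≤ (getStatus? c).getD 3 ∧ (getStatus? c).getD 3 ≤ 2 ∧ (getStatus? c).getD 3 < best then
            if (getStatus? c).getD 3 == 0 then 0 else loopB rest ((getStatus? c).getD 3)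
          else loopB rest best) = min best (fA (c :: rest))
    rw [hv]
    simp only [Option.getD_some]
    by_cases hcond : 0 ≤ v ∧ v ≤ 2 ∧ v < best
    · rw [if_pos hcond]
      by_cases hv0 : v = 0
      · have hfz : fA (c :: rest) = 0 := by
          rw [fA_eq_zero_iff, hscan]
          simp [hv0]
        rw [if_pos (by simp [hv0] : (v == (0:Int)) = true), hfz]
        omega
      · have hvbeq : (v == (0 : Int)) = false := by simpa using hv0
        rw [if_neg (by simp [hvbeq] : ¬ ((v == (0:Int)) = true))]
        rw [ih v (by omega) hrest]
        unfold fA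
        rw [hscan 0, hscan 1, hscan 2]
        unfold fA at h0 hrb
        by_cases hv1 : v = 1
        · subst hv1
          simp only [hvbeq, Bool.false_or, show ((1:Int) == 1) = true from rfl,
            show ((1:Int) == 2) = false from rfl, Bool.true_or, if_true]
          split_ifs at * <;> omega
        · have hv2 : v = 2 := by omega
          subst hv2
          simp only [show ((2:Int) == 0) = false from rfl, show ((2:Int) == 1) = false from rfl,
            show ((2:Int) == 2) = true from rfl, Bool.false_or, Bool.true_or, if_true]
          split_ifs at * <;> omega
    · rw [if_neg hcond]
      rw [ih best hb hrest]
      unfold fA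
      rw [hscan 0, hscan 1, hscan 2]
      unfold fA at h0 hrb
      by_cases hvr : 0 ≤ v ∧ v ≤ 2
      · have hvb : best ≤ v := by omega
        rcases hb with h1 | h2 | h3
        · subst h1
          have hz : (v == (0 : Int)) = false := by
            simp only [beq_eq_false_iff_ne, ne_eq]; omega
          simp only [hz, Bool.false_or]
          split_ifs at * <;> omega
        · subst h2
          have hz : (v == (0 : Int)) = false := by
            simp only [beq_eq_false_iff_ne, ne_eq]; omega
          have ho : (v == (1 : Int)) = false := by
            simp only [beq_eq_false_iff_ne, ne_eq]; omega
          simp only [hz, ho, Bool.false_or]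
          split_ifs at * <;> omega
        · subst h3
          exact absurd ⟨hvr.1, hvr.2, by omega⟩ hcond
      · have hz : (v == (0 : Int)) = false := by
          simp only [beq_eq_false_iff_ne, ne_eq]; omega
        have ho : (v == (1 : Int)) = false := by
          simp only [beq_eq_false_iff_ne, ne_eq]; omega
        have ht : (v == (2 : Int)) = false := by
          simp only [beq_eq_false_iff_ne, ne_eq]; omega
        simp only [hz, ho, ht, Bool.false_or]

-- ===== VERDICT (by name: the statement is the Claim_ definition above) =====
theorem calculate_status_spec : Claim_equal_calculate_status := by
  intro l _ hpre
  unfold Spec_calculate_status calculate_status calculate_status_alt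
  by_cases hnil : l.isEmpty
  · simp [hnil]
  · simp only [hnil, Bool.not_false, if_true, Bool.false_eq_true, if_false]
    show fA l = loopB l 3
    unfold Pre_calculate_status at hpre
    rw [Bool.or_eq_true] at hpre
    rcases hpre with hall | hzero
    · rw [loopB_min l 3 (by omega) hall]
      have hb := fA_bounds l
      omega
    · rw [List.any_eq_true] at hzero
      obtain ⟨c, hmem, hc0⟩ := hzero
      have hscan0 : scanStatusA l 0 = true :=
        scan0_of_mem l c ((List.takeWhile_prefix _).subset hmem) (by simpa using hc0)
      rw [loopB_zero l 3 (by omega) hscan0]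
      rw [fA_eq_zero_iff]
      exact hscan0
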